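-- pv_equiv track=rewrite | github.com/YamaguchiShuhei/jws_search | main.py | _correct_counter
-- ===== SOURCE A (Python) =====
-- def _correct_counter(pred_selection, l):
--     correct = 0
--     reach = 0
--     for i in range(len(l)-1):
--         if l[i+1] == pred_selection[i+1] == 1:
--             if reach == 1:
--                 correct += 1
--             else:
--                 reach = 1
--         if l[i+1] != pred_selection[i+1] and reach == 1:
--             reach = 0
--     return correct
-- ===== SOURCE B (Python) =====
-- def _correct_counter(pred_selection, l):
--     events = []
--     for j in range(1, len(l)):
--         if l[j] == pred_selection[j] == 1:
--             events.append(True)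
--         elif l[j] != pred_selection[j]:
--             events.append(False)
--     return sum(x and y for x, y in zip(events, events[1:]))
-- ===== Notes on version B (the rewrite author's own statement) =====
-- stated objective: simpler
-- what changed: Replaces A's reach/correct state machine with a filter-then-pairwise-count decomposition: classify each position as hit/miss (dropping neutral equal-but-not-1 positions) into an event list, then count adjacent hit-hit pairs with zip.
import Mathlib
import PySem

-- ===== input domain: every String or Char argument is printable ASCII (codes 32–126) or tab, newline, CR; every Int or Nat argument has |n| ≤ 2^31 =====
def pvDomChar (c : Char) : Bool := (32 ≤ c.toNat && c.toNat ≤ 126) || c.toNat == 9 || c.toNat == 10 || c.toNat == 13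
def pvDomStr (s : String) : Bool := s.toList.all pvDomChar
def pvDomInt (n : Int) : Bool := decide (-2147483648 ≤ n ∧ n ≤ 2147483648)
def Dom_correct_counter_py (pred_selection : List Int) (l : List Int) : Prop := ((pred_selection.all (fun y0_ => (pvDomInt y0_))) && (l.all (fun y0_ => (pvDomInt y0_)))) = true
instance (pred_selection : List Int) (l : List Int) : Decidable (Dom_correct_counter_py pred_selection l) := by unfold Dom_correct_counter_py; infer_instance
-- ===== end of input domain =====

-- B replaces A's reach/correct state machine by a filter-then-pairwise-count decomposition
-- (collect hit/miss events, count adjacent hit-hit pairs); objective: simpler, same cost.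

-- ===== PORT A =====
def correct_counter_py (pred_selection : List Int) (l : List Int) : Int :=
  ((PySem.List.pyRange 0 ((l.length : Int) - 1) 1).foldl
    (fun (s : Int × Int) i =>
      let lj := PySem.List.pyGetD l (i + 1) 0
      let pj := PySem.List.pyGetD pred_selection (i + 1) 0
      let s' := if lj = pj ∧ pj = 1 then (if s.2 = 1 then (s.1 + 1, s.2) else (s.1, 1)) else s
      if lj ≠ pj ∧ s'.2 = 1 then (s'.1, 0) else s') ((0 : Int), (0 : Int))).1

-- ===== PORT B =====
def correct_counter_py_alt (pred_selection : List Int) (l : List Int) : Int :=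
  let events := (PySem.List.pyRange 1 (l.length : Int) 1).foldl
    (fun (acc : List Bool) j =>
      let lj := PySem.List.pyGetD l j 0
      let pj := PySem.List.pyGetD pred_selection j 0
      if lj = pj ∧ pj = 1 then acc ++ [true]
      else if lj ≠ pj then acc ++ [false]
      else acc) []
  ((events.zip (PySem.List.slice events (some 1) none)).map
    (fun q => if q.1 && q.2 then (1 : Int) else 0)).sum

-- ===== PRECONDITION & SPEC =====
-- Pre_ excludes exactly the inputs where Python A raises IndexError:
-- len(l) ≥ 2 with pred_selection shorter than l (A indexes pred_selection[1..len(l)-1]).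
def Pre_correct_counter_py (pred_selection : List Int) (l : List Int) : Prop :=
  2 ≤ l.length → l.length ≤ pred_selection.length
instance (pred_selection : List Int) (l : List Int) : Decidable (Pre_correct_counter_py pred_selection l) := by unfold Pre_correct_counter_py; infer_instance
def pvWitness_correct_counter_py : List Int × List Int := ([1, 1, 1], [1, 0, 1])
def Spec_correct_counter_py (pred_selection : List Int) (l : List Int) (out : Int) : Prop := out = correct_counter_py_alt pred_selection l
instance (pred_selection : List Int) (l : List Int) (out : Int) : Decidable (Spec_correct_counter_py pred_selection l out) := by unfold Spec_correct_counter_py; infer_instance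

-- ===== CLAIM (what is proved, stated in full; the proofs are below) =====
def Claim_equal_correct_counter_py : Prop := ∀ (pred_selection : List Int) (l : List Int), Dom_correct_counter_py pred_selection l → Pre_correct_counter_py pred_selection l → Spec_correct_counter_py pred_selection l (correct_counter_py pred_selection l)

-- ===== LEMMAS AND PROOFS =====

-- classification of position j: some true = hit, some false = miss, none = neutral
def pvCls (pred_selection l : List Int) (j : Int) : Option Bool :=
  let lj := PySem.List.pyGetD l j 0
  let pj := PySem.List.pyGetD pred_selection j 0
  if lj = pj ∧ pj = 1 then some true
  else if lj ≠ pj then some false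
  else none

-- pairwise count as B computes it
def pvPairSum (E : List Bool) : Int :=
  ((E.zip E.tail).map (fun q => if q.1 && q.2 then (1 : Int) else 0)).sum

-- pair count of an event list given the previous-event flag (A's reach)
def pvCnt : Bool → List Bool → Int
  | _, [] => 0
  | r, b :: bs => (if r && b then 1 else 0) + pvCnt b bs

-- reach flag after consuming an event list
def pvFin (r : Bool) (evs : List Bool) : Bool := evs.getLast?.getD r

theorem pvFin_cons (r b : Bool) (bs : List Bool) : pvFin r (b :: bs) = pvFin b bs := by
  cases bs with
  | nil => simp [pvFin]
  | cons h t =>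
    unfold pvFin
    rw [List.getLast?_cons_cons]
    cases hx : (h :: t).getLast? with
    | none => simp [List.getLast?_eq_none_iff] at hx
    | some x => simp

theorem pvPairSum_cons_cons (a y : Bool) (zs : List Bool) :
    pvPairSum (a :: y :: zs) = (if a && y then (1 : Int) else 0) + pvPairSum (y :: zs) := by
  simp [pvPairSum]

theorem pvCnt_eq (evs : List Bool) : ∀ (b : Bool),
    pvCnt b evs = (if b && evs.headD false then 1 else 0) + pvPairSum evs := by
  induction evs with
  | nil => intro b; simp [pvCnt, pvPairSum]
  | cons y ys ih =>
    intro b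
    have hys : pvPairSum (y :: ys) = (if y && ys.headD false then 1 else 0) + pvPairSum ys := by
      cases ys with
      | nil => simp [pvPairSum]
      | cons z zs => rw [pvPairSum_cons_cons]; simp
    rw [pvCnt, ih y, hys]
    simp only [List.headD_cons]
    ring

theorem pvCnt_false (evs : List Bool) : pvCnt false evs = pvPairSum evs := by
  rw [pvCnt_eq]; simp

-- A's fold, over any index list, from a state (c, reach)
theorem pvInvA (pred_selection l : List Int) :
    ∀ (js : List Int) (c : Int) (r : Bool),
    js.foldl (fun (s : Int × Int) i =>
      let lj := PySem.List.pyGetD l (i + 1) 0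
      let pj := PySem.List.pyGetD pred_selection (i + 1) 0
      let s' := if lj = pj ∧ pj = 1 then (if s.2 = 1 then (s.1 + 1, s.2) else (s.1, 1)) else s
      if lj ≠ pj ∧ s'.2 = 1 then (s'.1, 0) else s') (c, if r then 1 else 0)
    = (c + pvCnt r (js.filterMap (fun i => pvCls pred_selection l (i + 1))),
       if pvFin r (js.filterMap (fun i => pvCls pred_selection l (i + 1))) then 1 else 0) := by
  intro js
  induction js with
  | nil => intro c r; simp [pvCnt, pvFin]
  | cons i js ih =>
    intro c r
    rw [List.foldl_cons, List.filterMap_cons]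
    by_cases h1 : PySem.List.pyGetD l (i + 1) 0 = PySem.List.pyGetD pred_selection (i + 1) 0
    · by_cases h2 : PySem.List.pyGetD pred_selection (i + 1) 0 = 1
      · -- hit
        have hg : pvCls pred_selection l (i + 1) = some true := by simp [pvCls, h1, h2]
        rw [hg]
        cases r
        · have h := ih c true
          simp only [if_true] at h
          simp [h1, h2, h, pvCnt, pvFin_cons]
        · have h := ih (c + 1) true
          simp only [if_true] at h
          simp [h1, h2, h, pvCnt, pvFin_cons]
          omega
      · -- neutral
        have hg : pvCls pred_selection l (i + 1) = none := by simp [pvCls, h1, h2]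
        rw [hg]
        have h := ih c r
        simp [h1, h2, h]
    · -- miss
      have hg : pvCls pred_selection l (i + 1) = some false := by simp [pvCls, h1]
      rw [hg]
      have h := ih c false
      norm_num at h
      cases r
      · simp [h1, h, pvCnt, pvFin_cons]
      · simp [h1, h, pvCnt, pvFin_cons]

-- B's fold, over any index list, builds the event list
theorem pvInvB (pred_selection l : List Int) :
    ∀ (js : List Int) (acc : List Bool),
    js.foldl (fun (acc : List Bool) j =>
      let lj := PySem.List.pyGetD l j 0
      let pj := PySem.List.pyGetD pred_selection j 0
      if lj = pj ∧ pj = 1 then acc ++ [true]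
      else if lj ≠ pj then acc ++ [false]
      else acc) acc
    = acc ++ js.filterMap (pvCls pred_selection l) := by
  intro js
  induction js with
  | nil => intro acc; simp
  | cons j js ih =>
    intro acc
    rw [List.foldl_cons]
    simp only [pvCls]
    by_cases h1 : PySem.List.pyGetD l j 0 = PySem.List.pyGetD pred_selection j 0
    · by_cases h2 : PySem.List.pyGetD pred_selection j 0 = 1
      · simp only [h1, h2, and_self, if_true, ih, List.filterMap_cons]
        simp [pvCls]
      · simp only [h1, h2, and_false, if_false, ne_eq, not_true_eq_false, ih, List.filterMap_cons]
        simp [pvCls]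
    · have h2 : ¬ (PySem.List.pyGetD l j 0 = PySem.List.pyGetD pred_selection j 0 ∧
          PySem.List.pyGetD pred_selection j 0 = 1) := fun h => h1 h.1
      simp only [ne_eq, h1, not_false_eq_true, if_true, ih, List.filterMap_cons]
      simp [pvCls]

-- A's shifted index range yields the same events as B's range
theorem pvShift (pred_selection l : List Int) (n : Int) :
    (PySem.List.pyRange 0 (n - 1) 1).filterMap (fun i => pvCls pred_selection l (i + 1))
    = (PySem.List.pyRange 1 n 1).filterMap (pvCls pred_selection l) := by
  rw [PySem.List.pyRange_one, PySem.List.pyRange_one]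
  rw [List.filterMap_map, List.filterMap_map]
  have hn : (n - 1 - 0).toNat = (n - 1).toNat := by omega
  rw [hn]
  apply List.filterMap_congr
  intro k _
  simp only [Function.comp]
  have h : ((0 : Int) + (k : Int)) + 1 = 1 + (k : Int) := by ring
  rw [h]

theorem correct_counter_py_eq (pred_selection l : List Int) :
    correct_counter_py pred_selection l = correct_counter_py_alt pred_selection l := by
  unfold correct_counter_py correct_counter_py_alt
  have hA := pvInvA pred_selection l (PySem.List.pyRange 0 ((l.length : Int) - 1) 1) 0 false
  simp only [Bool.false_eq_true, if_false] at hA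
  rw [hA]
  have hB := pvInvB pred_selection l (PySem.List.pyRange 1 (l.length : Int) 1) []
  rw [hB]
  simp only [List.nil_append, PySem.List.slice_from_one]
  rw [pvShift]
  simp only [zero_add, pvCnt_false]
  rfl

-- ===== VERDICT (by name: the statement is the Claim_ definition above) =====
theorem correct_counter_py_spec : Claim_equal_correct_counter_py := by
  intro pred_selection l _ _
  unfold Spec_correct_counter_py
  exact correct_counter_py_eq pred_selection l
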